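-- pv_equiv track=rewrite | github.com/camilorinconp/TuAppDeAccesorios | backend/app/utils/fulltext_search.py | _get_term_variations
-- ===== SOURCE A (Python) =====
-- from typing import List, Optional, Dict, Any, Union
--
-- def _get_term_variations(term: str) -> List[str]:
--     """Obtiene variaciones y sinónimos para términos comunes"""
--
--     # Diccionario de sinónimos y variaciones para accesorios
--     variations_map = {
--         'celular': ['movil', 'telefono', 'smartphone', 'cell'],
--         'cargador': ['cable', 'adaptador', 'charger'],
--         'funda': ['case', 'carcasa', 'protector'],
--         'audifonos': ['auriculares', 'earphones', 'headphones'],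
--         'protector': ['mica', 'cristal', 'glass', 'screen'],
--         'samsung': ['galaxy', 'sam'],
--         'iphone': ['apple', 'ios'],
--         'huawei': ['honor'],
--         'xiaomi': ['redmi', 'poco'],
--         'negro': ['black', 'dark'],
--         'blanco': ['white', 'claro'],
--         'azul': ['blue'],
--         'rojo': ['red'],
--         'verde': ['green'],
--         'original': ['genuino', 'authentic'],
--         'compatible': ['generico', 'universal']
--     }
--
--     term_lower = term.lower()
--     variations = []
--
--     # Buscar en el mapa de variaciones
--     for key, values in variations_map.items():
--         if term_lower == key:
--             variations.extend(values)
--         elif term_lower in values: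
--             variations.append(key)
--             variations.extend([v for v in values if v != term_lower])
--
--     return variations
-- ===== SOURCE B (Python) =====
-- from typing import List, Optional, Dict, Any, Union
--
-- # Fully expanded synonym table: every known term mapped directly to its complete
-- # variation list (the transitive key<->value expansion of the original map,
-- # written out once, so lookup is a single dict access).
-- _SYNONYMS: Dict[str, List[str]] = {
--     'celular': ['movil', 'telefono', 'smartphone', 'cell'],
--     'movil': ['celular', 'telefono', 'smartphone', 'cell'],
--     'telefono': ['celular', 'movil', 'smartphone', 'cell'],
--     'smartphone': ['celular', 'movil', 'telefono', 'cell'],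
--     'cell': ['celular', 'movil', 'telefono', 'smartphone'],
--     'cargador': ['cable', 'adaptador', 'charger'],
--     'cable': ['cargador', 'adaptador', 'charger'],
--     'adaptador': ['cargador', 'cable', 'charger'],
--     'charger': ['cargador', 'cable', 'adaptador'],
--     'funda': ['case', 'carcasa', 'protector'],
--     'case': ['funda', 'carcasa', 'protector'],
--     'carcasa': ['funda', 'case', 'protector'],
--     'protector': ['funda', 'case', 'carcasa', 'mica', 'cristal', 'glass', 'screen'],
--     'audifonos': ['auriculares', 'earphones', 'headphones'],
--     'auriculares': ['audifonos', 'earphones', 'headphones'],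
--     'earphones': ['audifonos', 'auriculares', 'headphones'],
--     'headphones': ['audifonos', 'auriculares', 'earphones'],
--     'mica': ['protector', 'cristal', 'glass', 'screen'],
--     'cristal': ['protector', 'mica', 'glass', 'screen'],
--     'glass': ['protector', 'mica', 'cristal', 'screen'],
--     'screen': ['protector', 'mica', 'cristal', 'glass'],
--     'samsung': ['galaxy', 'sam'],
--     'galaxy': ['samsung', 'sam'],
--     'sam': ['samsung', 'galaxy'],
--     'iphone': ['apple', 'ios'],
--     'apple': ['iphone', 'ios'],
--     'ios': ['iphone', 'apple'],
--     'huawei': ['honor'],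
--     'honor': ['huawei'],
--     'xiaomi': ['redmi', 'poco'],
--     'redmi': ['xiaomi', 'poco'],
--     'poco': ['xiaomi', 'redmi'],
--     'negro': ['black', 'dark'],
--     'black': ['negro', 'dark'],
--     'dark': ['negro', 'black'],
--     'blanco': ['white', 'claro'],
--     'white': ['blanco', 'claro'],
--     'claro': ['blanco', 'white'],
--     'azul': ['blue'],
--     'blue': ['azul'],
--     'rojo': ['red'],
--     'red': ['rojo'],
--     'verde': ['green'],
--     'green': ['verde'],
--     'original': ['genuino', 'authentic'],
--     'genuino': ['original', 'authentic'],
--     'authentic': ['original', 'genuino'],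
--     'compatible': ['generico', 'universal'],
--     'generico': ['compatible', 'universal'],
--     'universal': ['compatible', 'generico'],
-- }
--
--
-- def _get_term_variations(term: str) -> List[str]:
--     """Obtiene variaciones y sinónimos para términos comunes"""
--     return list(_SYNONYMS.get(term.lower(), []))
-- ===== Notes on version B (the rewrite author's own statement) =====
-- stated objective: idiomatic
-- what changed: B replaces A's per-call scan over every key and value list of the variations map by a fully expanded literal synonym table (every term, key or value, mapped directly to its complete variation list), so each call is a single dict lookup.
import Mathlib
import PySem

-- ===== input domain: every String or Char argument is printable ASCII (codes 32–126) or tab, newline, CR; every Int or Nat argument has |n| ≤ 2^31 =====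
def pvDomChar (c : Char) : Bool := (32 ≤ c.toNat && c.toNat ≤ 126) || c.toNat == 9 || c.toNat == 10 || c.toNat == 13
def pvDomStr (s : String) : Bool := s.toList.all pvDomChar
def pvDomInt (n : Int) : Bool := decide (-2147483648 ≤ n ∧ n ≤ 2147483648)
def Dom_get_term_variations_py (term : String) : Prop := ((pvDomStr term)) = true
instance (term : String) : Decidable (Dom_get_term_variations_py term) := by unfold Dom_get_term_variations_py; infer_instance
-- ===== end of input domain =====

-- B replaces A's per-call scan over the variations map by a fully expanded literal
-- synonym table (every term mapped directly to its complete variation list), so a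
-- call is a single dict lookup (objective: idiomatic).

-- ===== PORT A =====
-- A's dict literal `variations_map`
def pvVarMapList : List (String × List String) := [
  ("celular", ["movil", "telefono", "smartphone", "cell"]),
  ("cargador", ["cable", "adaptador", "charger"]),
  ("funda", ["case", "carcasa", "protector"]),
  ("audifonos", ["auriculares", "earphones", "headphones"]),
  ("protector", ["mica", "cristal", "glass", "screen"]),
  ("samsung", ["galaxy", "sam"]),
  ("iphone", ["apple", "ios"]),
  ("huawei", ["honor"]),
  ("xiaomi", ["redmi", "poco"]),
  ("negro", ["black", "dark"]),
  ("blanco", ["white", "claro"]),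
  ("azul", ["blue"]),
  ("rojo", ["red"]),
  ("verde", ["green"]),
  ("original", ["genuino", "authentic"]),
  ("compatible", ["generico", "universal"])]

-- one loop iteration of A: the `for key, values in variations_map.items():` body
def pvStepA (t : String) (acc : List String) (kv : String × List String) : List String :=
  if t == kv.1 then acc ++ kv.2
  else if kv.2.contains t then (acc ++ [kv.1]) ++ kv.2.filter (fun v => !(v == t))
  else acc

def get_term_variations_py (term : String) : List String :=
  let t := PySem.Str.lower term
  (PySem.Dict.ofList pvVarMapList).items.foldl (pvStepA t) []

-- ===== PORT B =====
-- Source B's module-level `_SYNONYMS` dict literal, transcribed entry for entry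
def pvSynonyms : PySem.Dict String (List String) := PySem.Dict.ofList [
  ("celular", ["movil", "telefono", "smartphone", "cell"]),
  ("movil", ["celular", "telefono", "smartphone", "cell"]),
  ("telefono", ["celular", "movil", "smartphone", "cell"]),
  ("smartphone", ["celular", "movil", "telefono", "cell"]),
  ("cell", ["celular", "movil", "telefono", "smartphone"]),
  ("cargador", ["cable", "adaptador", "charger"]),
  ("cable", ["cargador", "adaptador", "charger"]),
  ("adaptador", ["cargador", "cable", "charger"]),
  ("charger", ["cargador", "cable", "adaptador"]),
  ("funda", ["case", "carcasa", "protector"]),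
  ("case", ["funda", "carcasa", "protector"]),
  ("carcasa", ["funda", "case", "protector"]),
  ("protector", ["funda", "case", "carcasa", "mica", "cristal", "glass", "screen"]),
  ("audifonos", ["auriculares", "earphones", "headphones"]),
  ("auriculares", ["audifonos", "earphones", "headphones"]),
  ("earphones", ["audifonos", "auriculares", "headphones"]),
  ("headphones", ["audifonos", "auriculares", "earphones"]),
  ("mica", ["protector", "cristal", "glass", "screen"]),
  ("cristal", ["protector", "mica", "glass", "screen"]),
  ("glass", ["protector", "mica", "cristal", "screen"]),
  ("screen", ["protector", "mica", "cristal", "glass"]),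
  ("samsung", ["galaxy", "sam"]),
  ("galaxy", ["samsung", "sam"]),
  ("sam", ["samsung", "galaxy"]),
  ("iphone", ["apple", "ios"]),
  ("apple", ["iphone", "ios"]),
  ("ios", ["iphone", "apple"]),
  ("huawei", ["honor"]),
  ("honor", ["huawei"]),
  ("xiaomi", ["redmi", "poco"]),
  ("redmi", ["xiaomi", "poco"]),
  ("poco", ["xiaomi", "redmi"]),
  ("negro", ["black", "dark"]),
  ("black", ["negro", "dark"]),
  ("dark", ["negro", "black"]),
  ("blanco", ["white", "claro"]),
  ("white", ["blanco", "claro"]),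
  ("claro", ["blanco", "white"]),
  ("azul", ["blue"]),
  ("blue", ["azul"]),
  ("rojo", ["red"]),
  ("red", ["rojo"]),
  ("verde", ["green"]),
  ("green", ["verde"]),
  ("original", ["genuino", "authentic"]),
  ("genuino", ["original", "authentic"]),
  ("authentic", ["original", "genuino"]),
  ("compatible", ["generico", "universal"]),
  ("generico", ["compatible", "universal"]),
  ("universal", ["compatible", "generico"])]

def get_term_variations_py_alt (term : String) : List String :=
  pvSynonyms.getD (PySem.Str.lower term) []

-- ===== PRECONDITION & SPEC =====
def Spec_get_term_variations_py (term : String) (out : List String) : Prop := out = get_term_variations_py_alt term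
instance (term : String) (out : List String) : Decidable (Spec_get_term_variations_py term out) := by unfold Spec_get_term_variations_py; infer_instance

-- ===== CLAIM (what is proved, stated in full; the proofs are below) =====
def Claim_equal_get_term_variations_py : Prop := ∀ (term : String), Dom_get_term_variations_py term → Spec_get_term_variations_py term (get_term_variations_py term)

-- ===== LEMMAS AND PROOFS =====

set_option maxRecDepth 100000

-- every term mentioned anywhere in A's map
def pvAllTerms : List String := pvVarMapList.foldr (fun kv acc => kv.1 :: (kv.2 ++ acc)) []

-- on every mentioned term the two bodies agree (finite check)
theorem pv_agree_mem :
    (pvAllTerms.all fun t =>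
      (PySem.Dict.ofList pvVarMapList).items.foldl (pvStepA t) [] == pvSynonyms.getD t []) = true := by
  decide

-- every key/value occurring in the items of A's map dict is a mentioned term
theorem pv_items_sub :
    ((PySem.Dict.ofList pvVarMapList).items.all fun kv =>
      pvAllTerms.contains kv.1 && kv.2.all (fun v => pvAllTerms.contains v)) = true := by
  decide

-- every key of B's synonym table is a mentioned term
theorem pv_keys_sub : (pvSynonyms.keys.all fun k => pvAllTerms.contains k) = true := by
  decide

-- A's loop leaves the accumulator untouched when t matches nothing
theorem pv_foldA_id (t : String) :
    ∀ (l : List (String × List String)) (acc : List String),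
      (∀ kv ∈ l, (t == kv.1) = false ∧ kv.2.contains t = false) →
      l.foldl (pvStepA t) acc = acc := by
  intro l
  induction l with
  | nil => intro acc _; rfl
  | cons kv rest ih =>
      intro acc h
      have hkv := h kv (List.mem_cons_self ..)
      have hstep : pvStepA t acc kv = acc := by
        simp only [pvStepA, hkv.1, hkv.2, Bool.false_eq_true, if_false]
      simp only [List.foldl_cons, hstep]
      exact ih acc (fun kv' h' => h kv' (List.mem_cons_of_mem _ h'))

theorem pv_bodies_eq (t : String) :
    (PySem.Dict.ofList pvVarMapList).items.foldl (pvStepA t) [] = pvSynonyms.getD t [] := by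
  by_cases hmem : t ∈ pvAllTerms
  · have := List.all_eq_true.mp pv_agree_mem t hmem
    exact eq_of_beq this
  · have hA : (PySem.Dict.ofList pvVarMapList).items.foldl (pvStepA t) [] = [] := by
      apply pv_foldA_id
      intro kv hkv
      have hsub := List.all_eq_true.mp pv_items_sub kv hkv
      rw [Bool.and_eq_true] at hsub
      have h1 : kv.1 ∈ pvAllTerms := by
        have := hsub.1
        rw [List.contains_eq_mem, decide_eq_true_eq] at this
        exact this
      have h2 : ∀ v ∈ kv.2, v ∈ pvAllTerms := by
        intro v hv
        have := List.all_eq_true.mp hsub.2 v hv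
        rw [List.contains_eq_mem, decide_eq_true_eq] at this
        exact this
      constructor
      · cases hb : (t == kv.1) with
        | false => rfl
        | true => exact absurd (eq_of_beq hb ▸ h1) hmem
      · cases hb : kv.2.contains t with
        | false => rfl
        | true =>
            rw [List.contains_eq_mem, decide_eq_true_eq] at hb
            exact absurd (h2 t hb) hmem
    have hB : pvSynonyms.getD t [] = [] := by
      apply PySem.Dict.getD_of_not_contains
      rw [PySem.Dict.contains_eq_decide_mem_keys, decide_eq_false_iff_not]
      intro hk
      have := List.all_eq_true.mp pv_keys_sub t hk
      rw [List.contains_eq_mem, decide_eq_true_eq] at this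
      exact hmem this
    rw [hA, hB]

-- ===== VERDICT (by name: the statement is the Claim_ definition above) =====
theorem get_term_variations_py_spec : Claim_equal_get_term_variations_py := by
  intro term _
  show get_term_variations_py term = get_term_variations_py_alt term
  simpa [get_term_variations_py, get_term_variations_py_alt] using
    pv_bodies_eq (PySem.Str.lower term)
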